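-- pv_equiv track=rewrite | github.com/issdandavis/SCBE-AETHERMOORE | src/symphonic_cipher/scbe_aethermoore/axiom_grouped/polyhedral_flow.py | fibonacci_spin
-- ===== SOURCE A (Python) =====
-- from typing import Dict, List, Optional, Tuple
--
-- def fibonacci_spin(step: int, n_bits: int = 8) -> List[int]:
--     """
--     Generate a Fibonacci-ordered bit pattern for routing.
--
--     Each bit position follows the Fibonacci sequence mod 2.
--     This creates a phi-harmonic routing pattern that's stable
--     and self-similar at every scale.
--     """
--     bits = []
--     a, b = 0, 1
--     for _ in range(n_bits):
--         bits.append(b % 2)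
--         a, b = b, a + b
--     # Rotate by step position
--     shift = step % n_bits
--     return bits[shift:] + bits[:shift]
-- ===== SOURCE B (Python) =====
-- def fibonacci_spin(step: int, n_bits: int = 8):
--     # Fibonacci mod 2 is periodic with period 3 (1,1,0), so bit i is 0 iff i%3==2;
--     # fold the rotation in: output position j holds the bit at index (j+shift)%n_bits.
--     shift = step % n_bits
--     return [0 if ((j + shift) % n_bits) % 3 == 2 else 1 for j in range(n_bits)]
-- ===== Notes on version B (the rewrite author's own statement) =====
-- stated objective: faster
-- what changed: Replaces the Fibonacci (a,b) recurrence plus list rotation by the closed form of Fibonacci parity (period 3): one comprehension emits bit j as 0 iff ((j+shift)%n_bits)%3==2, with shift=step%n_bits; A's bignum Fibonacci values grow linearly in bit-size so A costs O(n^2) bit operations, B stays O(n).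
import Mathlib
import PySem

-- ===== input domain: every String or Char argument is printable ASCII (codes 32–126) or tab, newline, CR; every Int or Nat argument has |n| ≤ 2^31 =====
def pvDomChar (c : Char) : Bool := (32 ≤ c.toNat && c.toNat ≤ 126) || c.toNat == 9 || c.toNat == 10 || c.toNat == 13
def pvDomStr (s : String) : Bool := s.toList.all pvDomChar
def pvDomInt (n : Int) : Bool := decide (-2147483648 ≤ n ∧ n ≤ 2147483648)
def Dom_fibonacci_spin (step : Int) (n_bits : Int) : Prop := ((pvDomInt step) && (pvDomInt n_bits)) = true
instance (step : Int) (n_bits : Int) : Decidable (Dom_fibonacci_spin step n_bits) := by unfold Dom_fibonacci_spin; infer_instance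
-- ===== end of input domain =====

-- B replaces A's Fibonacci recurrence by the closed form of Fibonacci parity (period 3)
-- with the rotation folded into the index; equal return values whenever n_bits ≠ 0.

-- ===== PORT A =====
def fibonacci_spin (step : Int) (n_bits : Int) : List Int :=
  let st := (PySem.List.pyRange 0 n_bits 1).foldl
      (fun (s : List Int × Int × Int) _ =>
        (s.1 ++ [PySem.Int.mod s.2.2 2], s.2.2, s.2.1 + s.2.2)) ([], 0, 1)
  let bits := st.1
  let shift := PySem.Int.mod step n_bits
  PySem.List.slice bits (some shift) none ++ PySem.List.slice bits none (some shift)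

-- ===== PORT B =====
def fibonacci_spin_alt (step : Int) (n_bits : Int) : List Int :=
  let shift := PySem.Int.mod step n_bits
  (PySem.List.pyRange 0 n_bits 1).map (fun j =>
    if PySem.Int.mod (PySem.Int.mod (j + shift) n_bits) 3 = 2 then 0 else 1)

-- ===== PRECONDITION & SPEC =====
-- n_bits = 0 makes 'step % n_bits' raise ZeroDivisionError in both A and B.
def Pre_fibonacci_spin (step : Int) (n_bits : Int) : Prop := n_bits ≠ 0
instance (step : Int) (n_bits : Int) : Decidable (Pre_fibonacci_spin step n_bits) := by
  unfold Pre_fibonacci_spin; infer_instance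
def pvWitness_fibonacci_spin : Int × Int := (3, 8)

def Spec_fibonacci_spin (step : Int) (n_bits : Int) (out : List Int) : Prop := out = fibonacci_spin_alt step n_bits
instance (step : Int) (n_bits : Int) (out : List Int) : Decidable (Spec_fibonacci_spin step n_bits out) := by unfold Spec_fibonacci_spin; infer_instance

-- ===== CLAIM (what is proved, stated in full; the proofs are below) =====
def Claim_equal_fibonacci_spin : Prop := ∀ (step : Int) (n_bits : Int), Dom_fibonacci_spin step n_bits → Pre_fibonacci_spin step n_bits → Spec_fibonacci_spin step n_bits (fibonacci_spin step n_bits)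

-- ===== LEMMAS AND PROOFS =====

-- the closed-form bit at index k
def gbit (k : Nat) : Int := if k % 3 = 2 then 0 else 1

lemma foldl_const_iterate {α β : Type} (f : β → β) (l : List α) (init : β) :
    l.foldl (fun s _ => f s) init = f^[l.length] init := by
  induction l generalizing init with
  | nil => rfl
  | cons x xs ih => simp [List.foldl_cons, ih, Function.iterate_succ_apply]

lemma fibpar : ∀ n : Nat, Nat.fib n % 2 = if n % 3 = 0 then 0 else 1
  | 0 => by decide
  | 1 => by decide
  | 2 => by decide
  | (n+3) => by
    have h := fibpar n
    have hf : Nat.fib (n+3) = 2 * Nat.fib (n+1) + Nat.fib n := by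
      rw [show n+3 = (n+1)+2 from rfl, Nat.fib_add_two, show n+1+1 = n+2 from rfl,
          Nat.fib_add_two]; ring
    have h3 : (n+3) % 3 = n % 3 := by omega
    rw [hf, h3]
    by_cases h0 : n % 3 = 0 <;> simp [h0] at h ⊢ <;> omega

lemma iter_eq (n : Nat) :
    (fun s : List Int × Int × Int =>
      (s.1 ++ [PySem.Int.mod s.2.2 2], s.2.2, s.2.1 + s.2.2))^[n] ([], 0, 1)
    = ((List.range n).map gbit, ((Nat.fib n : Nat) : Int), ((Nat.fib (n+1) : Nat) : Int)) := by
  induction n with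
  | zero => simp
  | succ n ih =>
    rw [Function.iterate_succ_apply', ih]
    have hg : ((Nat.fib (n+1) % 2 : Nat) : Int) = gbit n := by
      rw [fibpar (n+1)]; unfold gbit
      by_cases h0 : n % 3 = 2
      · have : (n+1) % 3 = 0 := by omega
        simp [h0, this]
      · have : (n+1) % 3 ≠ 0 := by omega
        simp [h0, this]
    rw [List.range_succ, List.map_append,
        show n + 1 + 1 = n + 2 from rfl, Nat.fib_add_two]
    push_cast
    simp
    omega

lemma bits_eq (n_bits : Int) :
    ((PySem.List.pyRange 0 n_bits 1).foldl
      (fun (s : List Int × Int × Int) _ =>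
        (s.1 ++ [PySem.Int.mod s.2.2 2], s.2.2, s.2.1 + s.2.2)) ([], 0, 1)).1
    = (List.range n_bits.toNat).map gbit := by
  rw [foldl_const_iterate (fun s : List Int × Int × Int =>
        (s.1 ++ [PySem.Int.mod s.2.2 2], s.2.2, s.2.1 + s.2.2))]
  rw [PySem.List.length_pyRange_one]
  rw [iter_eq]
  simp

lemma gbit_cast (m : Nat) :
    (if PySem.Int.mod ((m : Nat) : Int) 3 = 2 then (0 : Int) else 1) = gbit m := by
  have hc : PySem.Int.mod ((m : Nat) : Int) 3 = ((m % 3 : Nat) : Int) := by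
    exact_mod_cast PySem.Int.mod_natCast m 3
  rw [hc]; unfold gbit
  split_ifs with h3 h4 <;> omega

lemma main_pos (step n_bits : Int) (h : 0 < n_bits) :
    fibonacci_spin step n_bits = fibonacci_spin_alt step n_bits := by
  unfold fibonacci_spin fibonacci_spin_alt
  simp only []
  rw [bits_eq n_bits]
  set shift := PySem.Int.mod step n_bits with hshift
  have hs0 : 0 ≤ shift := PySem.Int.mod_nonneg step h
  have hslt : shift < n_bits := PySem.Int.mod_lt step h
  set n : Nat := n_bits.toNat with hn
  have hnb : (n : Int) = n_bits := Int.toNat_of_nonneg (le_of_lt h)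
  set s : Nat := shift.toNat with hsd
  have hsb : (s : Int) = shift := Int.toNat_of_nonneg hs0
  have hsn : s < n := by omega
  rw [PySem.List.slice_from _ hs0, PySem.List.slice_to _ hs0]
  rw [PySem.List.pyRange_one]
  simp only [sub_zero, zero_add, List.map_map]
  apply List.ext_getElem
  · simp; omega
  · intro j h1 h2
    have hj : j < n := by simpa [hn] using h2
    rw [List.getElem_map, List.getElem_range]
    have hlen : (List.drop s ((List.range n).map gbit)).length = n - s := by simp
    by_cases hc : j < n - s
    · rw [List.getElem_append_left (by simp; omega)]
      rw [List.getElem_drop, List.getElem_map, List.getElem_range]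
      simp only [Function.comp_apply]
      have hin : PySem.Int.mod ((j : Int) + shift) n_bits = ((s + j : Nat) : Int) := by
        rw [PySem.Int.mod_eq_emod_of_pos h]
        rw [Int.emod_eq_of_lt (by omega) (by omega)]
        omega
      rw [hin, gbit_cast]
    · rw [List.getElem_append_right (by simp; omega)]
      rw [List.getElem_take, List.getElem_map, List.getElem_range]
      simp only [Function.comp_apply]
      have hin : PySem.Int.mod ((j : Int) + shift) n_bits
          = ((j - (n - s) : Nat) : Int) := by
        rw [PySem.Int.mod_eq_emod_of_pos h]
        rw [show (j : Int) + shift = ((j : Int) + shift - n_bits) + 1 * n_bits by ring,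
            Int.add_mul_emod_self_right]
        rw [Int.emod_eq_of_lt (by omega) (by omega)]
        push_cast [Nat.cast_sub (by omega : n - s ≤ j), Nat.cast_sub (le_of_lt hsn)]
        omega
      rw [hlen, hin, gbit_cast]

-- ===== VERDICT (by name: the statement is the Claim_ definition above) =====
theorem fibonacci_spin_spec : Claim_equal_fibonacci_spin := by
  intro step n_bits hdom hpre
  unfold Spec_fibonacci_spin
  rcases lt_trichotomy n_bits 0 with h | h | h
  · unfold fibonacci_spin fibonacci_spin_alt
    rw [PySem.List.pyRange_one_eq_nil (by omega)]
    simp [PySem.List.slice]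
  · exact absurd h hpre
  · exact main_pos step n_bits h
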